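-- pv_equiv track=rewrite | github.com/sharon0326/AISPIRE_demo | app/generation.py | parse_outlines
-- ===== SOURCE A (Python) =====
-- def parse_outlines(text):
--     outlines = []
--     current = []
--     for line in text.split('\n'):
--         if line.startswith('Outline'):
--             if current:
--                 outlines.append('\n'.join(current))
--                 current = []
--         current.append(line)
--     if current:
--         outlines.append('\n'.join(current))
--     return outlines
-- ===== SOURCE B (Python) =====
-- def parse_outlines(text):
--     blocks = []
--     lines = text.split('\n')
--     while lines:
--         i = 1
--         while i < len(lines) and not lines[i].startswith('Outline'):
--             i += 1
--         blocks.append('\n'.join(lines[:i]))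
--         lines = lines[i:]
--     return blocks
-- ===== Notes on version B (the rewrite author's own statement) =====
-- stated objective: alternative
-- what changed: Replaces A's single-pass accumulate-and-flush loop with state (outlines, current) by a recursive span decomposition: take the head line plus the following non-header lines as one block, then recurse on the remaining suffix.
import Mathlib
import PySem

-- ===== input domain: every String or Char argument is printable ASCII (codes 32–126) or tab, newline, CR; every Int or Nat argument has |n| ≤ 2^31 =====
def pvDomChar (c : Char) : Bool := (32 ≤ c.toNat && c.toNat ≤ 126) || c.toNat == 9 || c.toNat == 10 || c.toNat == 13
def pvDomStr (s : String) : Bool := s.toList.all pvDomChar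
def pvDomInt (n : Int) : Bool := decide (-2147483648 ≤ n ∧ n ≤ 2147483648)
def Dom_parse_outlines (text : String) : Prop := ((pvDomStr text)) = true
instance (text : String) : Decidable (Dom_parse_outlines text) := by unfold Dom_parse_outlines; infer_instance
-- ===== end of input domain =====

-- ===== PORT A =====
-- B replaces A's accumulate-and-flush pass by a span decomposition (take head + following non-header lines per block); alternative, same cost.
-- transliteration of A: foldl over the lines carrying (outlines, current), final flush
def pvStepA (st : List String × List String) (line : String) : List String × List String :=
  let st' :=
    if PySem.Str.startswith line "Outline" then
      if st.2 ≠ [] then (st.1 ++ [PySem.Str.join "\n" st.2], ([] : List String))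
      else st
    else st
  (st'.1, st'.2 ++ [line])

def parse_outlines (text : String) : List String :=
  let st := ((PySem.Chars.splitOn text.toList "\n".toList).map String.ofList).foldl pvStepA ([], [])
  if st.2 ≠ [] then st.1 ++ [PySem.Str.join "\n" st.2] else st.1

-- ===== PORT B =====
-- transliteration of Source B's inner while loop: extend block while the next line is not a header
def pvSpanB (block : List String) (rest : List String) : List String × List String :=
  match rest with
  | [] => (block, [])
  | r :: rs =>
    if ¬ PySem.Str.startswith r "Outline" then pvSpanB (block ++ [r]) rs
    else (block, r :: rs)

theorem pvSpanB_snd_le (block rest : List String) : (pvSpanB block rest).2.length ≤ rest.length := by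
  induction rest generalizing block with
  | nil => simp [pvSpanB]
  | cons r rs ih =>
    simp only [pvSpanB]
    split
    · exact Nat.le_trans (ih _) (Nat.le_succ _)
    · exact le_rfl

-- transliteration of Source B's outer while loop (one block per iteration), as structural recursion on the remaining lines
def pvGoB (lines : List String) : List String :=
  match lines with
  | [] => []
  | h :: rest =>
    let s := pvSpanB [h] rest
    PySem.Str.join "\n" s.1 :: pvGoB s.2
termination_by lines.length
decreasing_by
  simpa using Nat.lt_succ_of_le (pvSpanB_snd_le [h] rest)

def parse_outlines_alt (text : String) : List String :=
  pvGoB ((PySem.Chars.splitOn text.toList "\n".toList).map String.ofList)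

-- ===== PRECONDITION & SPEC =====
def Spec_parse_outlines (text : String) (out : List String) : Prop := out = parse_outlines_alt text
instance (text : String) (out : List String) : Decidable (Spec_parse_outlines text out) := by unfold Spec_parse_outlines; infer_instance

-- ===== CLAIM (what is proved, stated in full; the proofs are below) =====
def Claim_equal_parse_outlines : Prop := ∀ (text : String), Dom_parse_outlines text → Spec_parse_outlines text (parse_outlines text)

-- ===== LEMMAS AND PROOFS =====

-- final flush of A's state
def pvFlush (st : List String × List String) : List String :=
  if st.2 ≠ [] then st.1 ++ [PySem.Str.join "\n" st.2] else st.1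

theorem pvFoldInv (rest : List String) :
    ∀ outlines current, current ≠ [] →
      pvFlush (rest.foldl pvStepA (outlines, current)) =
        outlines ++ (PySem.Str.join "\n" (pvSpanB current rest).1 :: pvGoB (pvSpanB current rest).2) := by
  induction rest with
  | nil =>
    intro outlines current hc
    rw [pvGoB.eq_def]
    simp [pvFlush, pvSpanB, hc]
  | cons l rs ih =>
    intro outlines current hc
    by_cases hl : PySem.Chars.startswith l.toList ['O', 'u', 't', 'l', 'i', 'n', 'e'] = true
    · have hstep : pvStepA (outlines, current) l
          = (outlines ++ [PySem.Str.join "\n" current], [l]) := by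
        simp [pvStepA, hl, hc]
      rw [List.foldl_cons, hstep, ih _ [l] (by simp)]
      conv_rhs => rw [pvGoB.eq_def]
      simp [pvSpanB, hl]
    · have hstep : pvStepA (outlines, current) l = (outlines, current ++ [l]) := by
        simp [pvStepA, hl]
      rw [List.foldl_cons, hstep, ih _ (current ++ [l]) (by simp)]
      simp [pvSpanB, hl]

theorem pvMain (lines : List String) :
    pvFlush (lines.foldl pvStepA ([], [])) = pvGoB lines := by
  cases lines with
  | nil => rw [pvGoB.eq_def]; simp [pvFlush]
  | cons h rest =>
    have hstep : pvStepA ([], []) h = ([], [h]) := by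
      simp [pvStepA]
    rw [List.foldl_cons, hstep, pvFoldInv rest [] [h] (by simp)]
    conv_rhs => rw [pvGoB.eq_def]
    simp

-- ===== VERDICT (by name: the statement is the Claim_ definition above) =====
theorem parse_outlines_spec : Claim_equal_parse_outlines := by
  intro text _
  show parse_outlines text = parse_outlines_alt text
  unfold parse_outlines parse_outlines_alt
  exact pvMain _
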